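-- pv_equiv track=rewrite | github.com/MrBrantCode/unitest_baseline | mut_generate/mist_train_taco/taco_12200/solution.py | reorder_string
-- ===== SOURCE A (Python) =====
-- def reorder_string(s: str) -> str:
--     # Step 1: Create a sorted list of unique characters in the string
--     suniq = sorted(set(s))
--
--     # Step 2: Determine the maximum count of any character in the string
--     max_count = max(s.count(char) for char in suniq)
--
--     # Step 3: Initialize a list to keep track of the count of each character used
--     chr_count = [0] * len(suniq)
--
--     # Step 4: Initialize the result string
--     result = ''
--
--     # Step 5: Perform the re-ordering process
--     for _ in range(max_count):
--         # Append characters in ascending order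
--         for i in range(len(suniq)):
--             if chr_count[i] < s.count(suniq[i]):
--                 result += suniq[i]
--                 chr_count[i] += 1
--
--         # Append characters in descending order
--         for i in range(len(suniq) - 1, -1, -1):
--             if chr_count[i] < s.count(suniq[i]):
--                 result += suniq[i]
--                 chr_count[i] += 1
--
--     return result
-- ===== SOURCE B (Python) =====
-- def reorder_string(s: str) -> str:
--     counts = {}
--     for ch in s:
--         counts[ch] = counts.get(ch, 0) + 1
--     max_count = max(counts.values())
--     buckets = [[] for _ in range(2 * max_count)]
--     for ch in sorted(counts):
--         for b in range(counts[ch]):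
--             buckets[b].append(ch)
--     out = []
--     for b, bucket in enumerate(buckets):
--         out.extend(bucket if b % 2 == 0 else reversed(bucket))
--     return ''.join(out)
-- ===== Notes on version B (the rewrite author's own statement) =====
-- stated objective: faster
-- what changed: Transposes the loop order: instead of A's 2*max_count alternating forward/backward sweeps over the sorted alphabet with mutable per-char counters and repeated s.count() rescans, B distributes each character char-major into its first count(ch) buckets in one pass, then concatenates the buckets reversing the odd-indexed ones.
import Mathlib
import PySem

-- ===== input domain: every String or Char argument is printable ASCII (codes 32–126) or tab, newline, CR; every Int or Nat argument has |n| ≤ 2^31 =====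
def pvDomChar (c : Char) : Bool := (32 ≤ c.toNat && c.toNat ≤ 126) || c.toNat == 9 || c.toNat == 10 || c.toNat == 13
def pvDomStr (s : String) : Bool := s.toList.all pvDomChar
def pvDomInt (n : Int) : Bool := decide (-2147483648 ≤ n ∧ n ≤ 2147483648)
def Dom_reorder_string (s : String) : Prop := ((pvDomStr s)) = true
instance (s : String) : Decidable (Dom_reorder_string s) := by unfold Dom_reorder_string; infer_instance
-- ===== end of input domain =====

-- B transposes the loop order: instead of A's 2*max_count alternating forward/backward
-- sweeps over the sorted alphabet with mutable per-char counters and repeated s.count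
-- rescans, B distributes each character char-major into its first count(ch) buckets in
-- one pass and then concatenates the buckets, reversing the odd-indexed ones (faster:
-- no repeated rescans of s). Both raise ValueError on "" (excluded by Pre_).

-- ===== PORT A =====
-- A's inner-loop body: 'if chr_count[i] < s.count(suniq[i]): result += suniq[i]; chr_count[i] += 1'
-- (indices produced by range are in [0, len), so getD/set are exact here).
def stepA (u : List Char) (c : Char → Int) (st : List Int × List Char) (i : Nat) :
    List Int × List Char :=
  if st.1.getD i 0 < c (u.getD i ' ') then
    (st.1.set i (st.1.getD i 0 + 1), st.2 ++ [u.getD i ' '])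
  else st

def reorder_string (s : String) : String :=
  let cs := s.toList
  let suniq := PySem.List.sorted (PySem.Set.ofList cs) (fun x => x) false
  -- max(s.count(char) for char in suniq); none = ValueError on empty input (outside Pre_)
  match PySem.List.max? (suniq.map (fun ch => ((cs.count ch : Nat) : Int))) (fun x => x) with
  | none => ""
  | some max_count =>
    let n := suniq.length
    let c : Char → Int := fun ch => ((cs.count ch : Nat) : Int)
    -- for _ in range(max_count): ascending pass over range(n), then descending pass
    -- (range(n-1,-1,-1) enumerates exactly (List.range n).reverse)
    let fin := (PySem.List.pyRange 0 max_count 1).foldl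
      (fun st _ =>
        let st1 := (List.range n).foldl (stepA suniq c) st
        (List.range n).reverse.foldl (stepA suniq c) st1)
      (List.replicate n 0, [])
    String.ofList fin.2

-- ===== PORT B =====
def reorder_string_alt (s : String) : String :=
  let counts := PySem.Dict.counter s.toList
  -- max(counts.values()); none = ValueError on empty input (outside Pre_)
  match PySem.List.max? counts.values (fun x => x) with
  | none => ""
  | some max_count =>
    -- buckets = [[] for _ in range(2 * max_count)]
    let buckets0 : List (List Char) := List.replicate (2 * max_count).toNat []
    -- for ch in sorted(counts): for b in range(counts[ch]): buckets[b].append(ch)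
    -- (counts[ch]: ch is a key, so the lookup never raises and getD is exact;
    --  b is always in [0, len(buckets)), so set/getD are exact)
    let buckets := (PySem.List.sorted counts.keys (fun x => x) false).foldl
      (fun bk ch =>
        (PySem.List.pyRange 0 (counts.getD ch 0) 1).foldl
          (fun bk b => bk.set b.toNat (bk.getD b.toNat [] ++ [ch])) bk)
      buckets0
    -- for b, bucket in enumerate(buckets): out.extend(bucket if b % 2 == 0 else reversed(bucket))
    let out := (PySem.List.enumerate buckets 0).foldl
      (fun out p => out ++ (if PySem.Int.mod p.1 2 = 0 then p.2 else p.2.reverse)) []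
    String.ofList out

-- ===== PRECONDITION & SPEC =====
-- Pre_ excludes only the empty string, on which A (and B) raise ValueError from max().
def Pre_reorder_string (s : String) : Prop := s ≠ ""
instance (s : String) : Decidable (Pre_reorder_string s) := by unfold Pre_reorder_string; infer_instance
def pvWitness_reorder_string : String := "aab"

def Spec_reorder_string (s : String) (out : String) : Prop := out = reorder_string_alt s
instance (s : String) (out : String) : Decidable (Spec_reorder_string s out) := by unfold Spec_reorder_string; infer_instance

-- ===== CLAIM (what is proved, stated in full; the proofs are below) =====
def Claim_equal_reorder_string : Prop := ∀ (s : String), Dom_reorder_string s → Pre_reorder_string s → Spec_reorder_string s (reorder_string s)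

-- ===== LEMMAS AND PROOFS =====

def hybA (u : List Char) (c : Char → Int) (t : Int) (k : Nat) : List Int :=
  (u.take k).map (fun ch => min (c ch) (t+1)) ++ (u.drop k).map (fun ch => min (c ch) t)

lemma asc_pass (u : List Char) (c : Char → Int) (t : Int) :
    ∀ (m k : Nat), k + m = u.length → ∀ out : List Char,
      (List.range' k m).foldl (stepA u c) (hybA u c t k, out)
        = (u.map (fun ch => min (c ch) (t+1)),
           out ++ (u.drop k).filter (fun ch => decide (t+1 ≤ c ch))) := by
  intro m
  induction m with
  | zero =>
    intro k hk out
    have hk' : k = u.length := by omega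
    subst hk'
    simp [hybA, List.take_of_length_le (le_refl u.length), List.drop_of_length_le (le_refl u.length)]
  | succ m ih =>
    intro k hk out
    have hklt : k < u.length := by omega
    rw [List.range'_succ, List.foldl_cons]
    have hdrop : u.drop k = u[k] :: u.drop (k+1) := (List.getElem_cons_drop hklt).symm
    have hTlen : ((u.take k).map (fun ch => min (c ch) (t+1))).length = k := by
      simp [List.length_take, Nat.min_eq_left (le_of_lt hklt)]
    have hgetD : (hybA u c t k).getD k 0 = min (c u[k]) t := by
      unfold hybA
      rw [List.getD_eq_getElem?_getD, List.getElem?_append_right (by omega), hTlen]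
      rw [hdrop]
      simp [List.getElem?_eq_getElem hklt]
    have hugetD : u.getD k ' ' = u[k] := by
      rw [List.getD_eq_getElem?_getD, List.getElem?_eq_getElem hklt]
      rfl
    have htake : u.take (k+1) = u.take k ++ [u[k]] := by
      rw [List.take_add_one, List.getElem?_eq_getElem hklt]
      rfl
    by_cases hp : t + 1 ≤ c u[k]
    · have hcond : (hybA u c t k).getD k 0 < c (u.getD k ' ') := by
        rw [hgetD, hugetD, min_def]; split_ifs <;> omega
      have hset : (hybA u c t k).set k ((hybA u c t k).getD k 0 + 1) = hybA u c t (k+1) := by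
        rw [hgetD]
        unfold hybA
        rw [List.set_append]
        rw [hTlen]
        simp only [lt_irrefl, Nat.sub_self]
        rw [htake, hdrop]
        simp only [List.map_append, List.map_cons, List.set_cons_zero, List.map_nil]
        rw [List.append_assoc]
        have h1 : min (c u[k]) t = t := min_eq_right (by omega)
        have h2 : min (c u[k]) (t+1) = t + 1 := min_eq_right hp
        rw [h1, h2]
        rfl
      rw [stepA, if_pos hcond, hset, hugetD]
      rw [ih (k+1) (by omega) (out ++ [u[k]])]
      rw [hdrop, List.filter_cons, if_pos (by simpa using hp)]
      simp
    · have hcond : ¬ ((hybA u c t k).getD k 0 < c (u.getD k ' ')) := by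
        rw [hgetD, hugetD, min_def]; split_ifs <;> omega
      have hst : hybA u c t k = hybA u c t (k+1) := by
        unfold hybA
        rw [htake, hdrop]
        simp only [List.map_append, List.map_cons, List.map_nil, List.append_assoc]
        have h1 : min (c u[k]) t = c u[k] := min_eq_left (by omega)
        have h2 : min (c u[k]) (t+1) = c u[k] := min_eq_left (by omega)
        rw [h1, h2]
        rfl
      rw [stepA, if_neg hcond, hst]
      rw [ih (k+1) (by omega) out]
      rw [hdrop, List.filter_cons, if_neg (by simpa using hp)]

def hybD (u : List Char) (c : Char → Int) (t : Int) (k : Nat) : List Int :=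
  (u.take k).map (fun ch => min (c ch) t) ++ (u.drop k).map (fun ch => min (c ch) (t+1))

lemma desc_pass (u : List Char) (c : Char → Int) (t : Int) :
    ∀ (k : Nat), k ≤ u.length → ∀ out : List Char,
      ((List.range' 0 k).reverse).foldl (stepA u c) (hybD u c t k, out)
        = (u.map (fun ch => min (c ch) (t+1)),
           out ++ ((u.take k).filter (fun ch => decide (t+1 ≤ c ch))).reverse) := by
  intro k
  induction k with
  | zero =>
    intro _ out
    simp [hybD]
  | succ k ih =>
    intro hk out
    have hklt : k < u.length := by omega
    rw [List.range'_1_concat, List.reverse_append, List.reverse_singleton, List.singleton_append,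
        List.foldl_cons]
    have hdrop : u.drop k = u[k] :: u.drop (k+1) := (List.getElem_cons_drop hklt).symm
    have htake : u.take (k+1) = u.take k ++ [u[k]] := by
      rw [List.take_add_one, List.getElem?_eq_getElem hklt]
      rfl
    have hTlen : ((u.take (k+1)).map (fun ch => min (c ch) t)).length = k + 1 := by
      simp [List.length_take, Nat.min_eq_left hk]
    have hgetD : (hybD u c t (k+1)).getD k 0 = min (c u[k]) t := by
      unfold hybD
      rw [List.getD_eq_getElem?_getD, List.getElem?_append_left (by omega), htake]
      simp
      rw [List.getElem?_eq_getElem hklt]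
      rfl
    have hugetD : u.getD k ' ' = u[k] := by
      rw [List.getD_eq_getElem?_getD, List.getElem?_eq_getElem hklt]
      rfl
    by_cases hp : t + 1 ≤ c u[k]
    · have hcond : (hybD u c t (k+1)).getD k 0 < c (u.getD k ' ') := by
        rw [hgetD, hugetD, min_def]; split_ifs <;> omega
      have hset : (hybD u c t (k+1)).set k ((hybD u c t (k+1)).getD k 0 + 1) = hybD u c t k := by
        rw [hgetD]
        unfold hybD
        rw [htake, hdrop]
        simp only [List.map_append, List.map_cons, List.map_nil, List.append_assoc,
          List.singleton_append]
        have hlen : ((u.take k).map (fun ch => min (c ch) t)).length = k := by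
          simp [List.length_take, Nat.min_eq_left (le_of_lt hklt)]
        rw [List.set_append, hlen, if_neg (lt_irrefl k), Nat.sub_self, List.set_cons_zero]
        have h1 : min (c u[k]) t = t := min_eq_right (by omega)
        have h2 : min (c u[k]) (t+1) = t + 1 := min_eq_right hp
        rw [h1, h2]
      simp only [Nat.zero_add]
      rw [stepA, if_pos hcond, hset, hugetD]
      rw [ih (le_of_lt hklt) (out ++ [u[k]])]
      rw [htake, List.filter_append, List.filter_cons]
      simp [hp]
    · have hcond : ¬ ((hybD u c t (k+1)).getD k 0 < c (u.getD k ' ')) := by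
        rw [hgetD, hugetD, min_def]; split_ifs <;> omega
      have hst : hybD u c t (k+1) = hybD u c t k := by
        unfold hybD
        rw [htake, hdrop]
        simp only [List.map_append, List.map_cons, List.map_nil, List.append_assoc]
        have h1 : min (c u[k]) t = c u[k] := min_eq_left (by omega)
        have h2 : min (c u[k]) (t+1) = c u[k] := min_eq_left (by omega)
        rw [h1, h2]
        rfl
      simp only [Nat.zero_add]
      rw [stepA, if_neg hcond, hst]
      rw [ih (le_of_lt hklt) out]
      rw [htake, List.filter_append, List.filter_cons]
      simp [hp]

def blkcat (u : List Char) (c : Char → Int) : Nat → List Char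
  | 0 => []
  | r+1 => blkcat u c r ++ u.filter (fun ch => decide (2*(r:Int)+1 ≤ c ch))
            ++ (u.filter (fun ch => decide (2*(r:Int)+2 ≤ c ch))).reverse

lemma hybA_zero (u : List Char) (c : Char → Int) (t : Int) :
    hybA u c t 0 = u.map (fun ch => min (c ch) t) := by
  simp [hybA]

lemma hybD_len (u : List Char) (c : Char → Int) (t : Int) :
    hybD u c t u.length = u.map (fun ch => min (c ch) t) := by
  simp [hybD]

lemma round_step (u : List Char) (c : Char → Int) (t : Int) (out : List Char) :
    (List.range u.length).reverse.foldl (stepA u c)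
      ((List.range u.length).foldl (stepA u c) (u.map (fun ch => min (c ch) t), out))
    = (u.map (fun ch => min (c ch) (t+2)),
       out ++ u.filter (fun ch => decide (t+1 ≤ c ch))
           ++ (u.filter (fun ch => decide (t+2 ≤ c ch))).reverse) := by
  rw [List.range_eq_range']
  rw [← hybA_zero u c t]
  rw [asc_pass u c t u.length 0 (by omega) out]
  rw [← hybD_len u c (t+1), List.drop_zero]
  rw [desc_pass u c (t+1) u.length (le_refl _) _]
  rw [List.take_length]
  have : t + 1 + 1 = t + 2 := by ring
  rw [this]

lemma A_outer (u : List Char) (c : Char → Int) (h0 : ∀ ch ∈ u, 0 ≤ c ch) (m : Nat) :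
    (PySem.List.pyRange 0 (m:Int) 1).foldl
      (fun st _ =>
        let st1 := (List.range u.length).foldl (stepA u c) st
        (List.range u.length).reverse.foldl (stepA u c) st1)
      (List.replicate u.length 0, [])
    = (u.map (fun ch => min (c ch) (2*(m:Int))), blkcat u c m) := by
  have hrepl : List.replicate u.length (0:Int) = u.map (fun ch => min (c ch) 0) := by
    symm
    rw [List.eq_replicate_iff]
    constructor
    · simp
    · intro b hb
      rcases List.mem_map.1 hb with ⟨ch, hch, rfl⟩
      exact min_eq_right (h0 ch hch)
  induction m with
  | zero =>
    rw [Nat.cast_zero, PySem.List.pyRange_one_eq_nil (le_refl 0), List.foldl_nil, hrepl]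
    norm_num [blkcat]
  | succ m ih =>
    have hc : ((m+1 : Nat) : Int) = (m:Int) + 1 := by push_cast; ring
    rw [hc, PySem.List.pyRange_one_succ_right (by positivity), List.foldl_append, ih]
    simp only [List.foldl_cons, List.foldl_nil]
    rw [round_step u c (2*(m:Int)) (blkcat u c m)]
    have h1 : 2*(m:Int) + 2 = 2*((m:Int)+1) := by ring
    rw [h1]
    congr 1

-- ===== B-side lemmas: bucket distribution =====

-- one character ch distributed into buckets 0..t-1
lemma innerB (ch : Char) : ∀ (t : Nat) (bk : List (List Char)), t ≤ bk.length →
    (PySem.List.pyRange 0 ((t:Nat):Int) 1).foldl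
        (fun bk b => bk.set b.toNat (bk.getD b.toNat [] ++ [ch])) bk
      = bk.mapIdx (fun i l => if i < t then l ++ [ch] else l) := by
  intro t
  induction t with
  | zero =>
    intro bk _
    rw [Nat.cast_zero, PySem.List.pyRange_one_eq_nil (le_refl 0), List.foldl_nil]
    apply List.ext_getElem
    · simp
    · intro i h1 h2
      simp [List.getElem_mapIdx]
  | succ t ih =>
    intro bk hlen
    have hc : ((t+1 : Nat) : Int) = (t:Int) + 1 := by push_cast; ring
    rw [hc, PySem.List.pyRange_one_succ_right (by positivity), List.foldl_append, List.foldl_cons,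
        List.foldl_nil, ih bk (by omega)]
    have htlt : t < bk.length := by omega
    have htN : ((t:Int)).toNat = t := Int.toNat_natCast t
    have hmlen : (bk.mapIdx (fun i l => if i < t then l ++ [ch] else l)).length = bk.length := by
      simp
    have hget : (bk.mapIdx (fun i l => if i < t then l ++ [ch] else l)).getD t [] = bk[t] := by
      rw [List.getD_eq_getElem?_getD, List.getElem?_eq_getElem (by omega)]
      simp [List.getElem_mapIdx]
    rw [htN, hget]
    apply List.ext_getElem
    · simp
    · intro i h1 h2
      rw [List.getElem_set]
      by_cases hit : t = i
      · subst hit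
        simp [List.getElem_mapIdx]
      · rw [if_neg hit]
        have h3 : i < bk.length := by simp at h2; omega
        simp only [List.getElem_mapIdx]
        by_cases hi : i < t
        · rw [if_pos hi, if_pos (by omega)]
        · rw [if_neg hi, if_neg (by omega)]

-- all characters of u distributed char-major
lemma outerB (cn : Char → Nat) : ∀ (u : List Char) (bk : List (List Char)),
    (∀ ch ∈ u, cn ch ≤ bk.length) →
    u.foldl (fun bk ch =>
        (PySem.List.pyRange 0 ((cn ch : Nat):Int) 1).foldl
          (fun bk b => bk.set b.toNat (bk.getD b.toNat [] ++ [ch])) bk) bk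
      = bk.mapIdx (fun i l => l ++ u.filter (fun ch => decide (i < cn ch))) := by
  intro u
  induction u with
  | nil =>
    intro bk _
    rw [List.foldl_nil]
    apply List.ext_getElem
    · simp
    · intro i h1 h2
      simp [List.getElem_mapIdx]
  | cons ch u ih =>
    intro bk hlen
    rw [List.foldl_cons, innerB ch (cn ch) bk (hlen ch List.mem_cons_self)]
    rw [ih _ (by intro x hx; simpa using hlen x (List.mem_cons_of_mem _ hx))]
    apply List.ext_getElem
    · simp
    · intro i h1 h2
      have h3 : i < bk.length := by simp at h2; omega
      simp only [List.getElem_mapIdx, List.filter_cons]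
      by_cases hi : i < cn ch
      · rw [if_pos hi, if_pos (by simpa using hi)]
        simp
      · rw [if_neg hi, if_neg (by simpa using hi)]

lemma repl_mapIdx (N : Nat) (g : Nat → List Char) :
    (List.replicate N ([] : List Char)).mapIdx (fun i l => l ++ g i)
      = (List.range N).map g := by
  apply List.ext_getElem
  · simp
  · intro i h1 h2
    simp [List.getElem_mapIdx]

-- concatenating the buckets, odd ones reversed, gives A's block concatenation
lemma concatB (u : List Char) (cn : Char → Nat) : ∀ (M : Nat),
    (PySem.List.enumerate ((List.range (2*M)).map
        (fun i => u.filter (fun ch => decide (i < cn ch)))) 0).foldl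
      (fun out p => out ++ (if PySem.Int.mod p.1 2 = 0 then p.2 else p.2.reverse)) []
    = blkcat u (fun ch => ((cn ch : Nat) : Int)) M := by
  intro M
  induction M with
  | zero =>
    simp [PySem.List.enumerate_nil, blkcat]
  | succ M ih =>
    have hr : 2*(M+1) = (2*M) + 1 + 1 := by omega
    rw [hr, List.range_succ, List.range_succ, List.map_append, List.map_append,
        List.append_assoc, PySem.List.enumerate_append, List.foldl_append, ih]
    simp only [List.map_cons, List.map_nil, List.length_map, List.length_range,
      List.nil_append, List.cons_append, PySem.List.enumerate_cons, PySem.List.enumerate_nil,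
      List.foldl_cons, List.foldl_nil, Int.zero_add]
    have hmod0 : PySem.Int.mod ((2*M : Nat):Int) 2 = 0 := by
      rw [PySem.Int.mod_eq_emod_of_pos (by norm_num)]
      omega
    have hmod1 : ¬ PySem.Int.mod (((2*M : Nat):Int) + 1) 2 = 0 := by
      intro h
      rw [PySem.Int.mod_eq_emod_of_pos (by norm_num)] at h
      omega
    rw [if_pos hmod0, if_neg hmod1]
    have hf1 : u.filter (fun ch => decide (2*M < cn ch))
        = u.filter (fun ch => decide (2*(M:Int)+1 ≤ ((cn ch : Nat):Int))) := by
      apply List.filter_congr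
      intro ch _
      simp only [decide_eq_decide]
      omega
    have hf2 : u.filter (fun ch => decide (2*M+1 < cn ch))
        = u.filter (fun ch => decide (2*(M:Int)+2 ≤ ((cn ch : Nat):Int))) := by
      apply List.filter_congr
      intro ch _
      simp only [decide_eq_decide]
      omega
    rw [hf1, hf2]
    show _ = blkcat u (fun ch => ((cn ch : Nat):Int)) (M+1)
    rw [blkcat]

-- ===== max? characterisation (A raises ValueError on empty) =====

lemma pymax_go2 (xs : List Int) : ∀ a : Int, ∃ M : Int,
    xs.foldl (fun acc x => PySem.List.min2?.match_1 (fun _ => Option Int) acc (fun _ => some x)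
      (fun m => if (fun y : Int => y) m < (fun y : Int => y) x then some x else some m))
      (some a) = some M
    ∧ (M = a ∨ M ∈ xs) ∧ a ≤ M ∧ ∀ y ∈ xs, y ≤ M := by
  induction xs with
  | nil => intro a; exact ⟨a, rfl, Or.inl rfl, le_refl a, by simp⟩
  | cons x xs ih =>
    intro a
    by_cases h : a < x
    · obtain ⟨M, hM, hmem, hle, hub⟩ := ih x
      refine ⟨M, ?_, ?_, ?_, ?_⟩
      · simpa [List.foldl_cons, if_pos h] using hM
      · rcases hmem with rfl | hmem
        · exact Or.inr (List.mem_cons_self)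
        · exact Or.inr (List.mem_cons_of_mem _ hmem)
      · omega
      · intro y hy
        rcases List.mem_cons.1 hy with rfl | hy
        · exact hle
        · exact hub y hy
    · obtain ⟨M, hM, hmem, hle, hub⟩ := ih a
      refine ⟨M, ?_, ?_, ?_, ?_⟩
      · simpa [List.foldl_cons, if_neg h] using hM
      · rcases hmem with rfl | hmem
        · exact Or.inl rfl
        · exact Or.inr (List.mem_cons_of_mem _ hmem)
      · exact hle
      · intro y hy
        rcases List.mem_cons.1 hy with rfl | hy
        · omega
        · exact hub y hy

lemma pymax_spec (xs : List Int) (h : xs ≠ []) : ∃ M : Int,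
    PySem.List.max? xs (fun x => x) = some M ∧ M ∈ xs ∧ ∀ y ∈ xs, y ≤ M := by
  cases xs with
  | nil => exact absurd rfl h
  | cons x xs =>
    obtain ⟨M, hM, hmem, hle, hub⟩ := pymax_go2 xs x
    refine ⟨M, ?_, ?_, ?_⟩
    · unfold PySem.List.max?
      rw [List.foldl_cons]
      exact hM
    · rcases hmem with rfl | hmem
      · exact List.mem_cons_self
      · exact List.mem_cons_of_mem _ hmem
    · intro y hy
      rcases List.mem_cons.1 hy with rfl | hy
      · exact hle
      · exact hub y hy

lemma pymax_perm (l l' : List Int) (h : l.Perm l') :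
    PySem.List.max? l (fun x => x) = PySem.List.max? l' (fun x => x) := by
  rcases eq_or_ne l [] with rfl | hne
  · have h2 := List.Perm.eq_nil h.symm
    rw [h2]
  · have hne' : l' ≠ [] := by
      intro hh
      subst hh
      exact hne (List.Perm.eq_nil h)
    obtain ⟨M, hM, hmem, hub⟩ := pymax_spec l hne
    obtain ⟨M', hM', hmem', hub'⟩ := pymax_spec l' hne'
    have : M = M' := le_antisymm (hub' M (h.mem_iff.1 hmem)) (hub M' (h.mem_iff.2 hmem'))
    rw [hM, hM', this]

-- ===== VERDICT (by name: the statement is the Claim_ definition above) =====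
theorem reorder_string_spec : Claim_equal_reorder_string := by
  unfold Claim_equal_reorder_string Spec_reorder_string Pre_reorder_string
  intro s _ hs
  have hcs : s.toList ≠ [] := by
    intro h
    exact hs (by
      have := congrArg String.ofList h
      simpa using this)
  unfold reorder_string reorder_string_alt
  simp only [PySem.Dict.keys_counter]
  have hvals : (PySem.Dict.counter s.toList).values
      = (PySem.Set.ofList s.toList : List Char).map (fun ch => ((s.toList.count ch : Nat) : Int)) := by
    unfold PySem.Dict.values
    rw [PySem.Dict.items_counter]
    rw [List.map_map]
    rfl
  have hperm : ((PySem.List.sorted (PySem.Set.ofList s.toList) (fun x => x) false).map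
        (fun ch => ((s.toList.count ch : Nat) : Int))).Perm
      ((PySem.Set.ofList s.toList : List Char).map (fun ch => ((s.toList.count ch : Nat) : Int))) :=
    (PySem.List.sorted_perm _ _ _).map _
  have hmaxeq := pymax_perm _ _ hperm
  rw [← hvals] at hmaxeq
  have hune : (PySem.List.sorted (PySem.Set.ofList s.toList) (fun x => x) false).map
      (fun ch => ((s.toList.count ch : Nat) : Int)) ≠ [] := by
    intro h
    rw [List.map_eq_nil_iff, PySem.List.sorted_eq_nil_iff] at h
    obtain ⟨x, xs, hx⟩ := List.exists_cons_of_ne_nil hcs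
    have hxmem : x ∈ PySem.Set.ofList s.toList := by
      rw [PySem.Set.mem_ofList, hx]
      exact List.mem_cons_self
    rw [h] at hxmem
    simp at hxmem
  obtain ⟨M, hM, hMmem, hMub⟩ := pymax_spec _ hune
  have hM0 : 0 ≤ M := by
    rcases List.mem_map.1 hMmem with ⟨ch, _, rfl⟩
    positivity
  have hMB : (PySem.List.max? (PySem.Dict.counter s.toList).values fun x => x) = some M :=
    hmaxeq ▸ hM
  rw [hM, hMB]
  simp only [PySem.Dict.getD_counter]
  have hMt : M = ((M.toNat : Nat) : Int) := (Int.toNat_of_nonneg hM0).symm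
  -- A side
  rw [hMt]
  rw [A_outer _ _ (fun ch _ => by positivity) M.toNat]
  -- B side
  have h2M : (2*M.toNat : Int).toNat = 2*M.toNat := by omega
  have hcond : ∀ ch ∈ PySem.List.sorted (PySem.Set.ofList s.toList) (fun x => x) false,
      s.toList.count ch ≤ (List.replicate ((2*((M.toNat:Nat):Int)).toNat) ([] : List Char)).length := by
    intro ch hch
    have hmem : ((s.toList.count ch : Nat):Int) ∈ (PySem.List.sorted (PySem.Set.ofList s.toList) (fun x => x) false).map
        (fun ch => ((s.toList.count ch : Nat) : Int)) := List.mem_map_of_mem hch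
    have := hMub _ hmem
    simp only [List.length_replicate]
    omega
  rw [outerB (fun ch => s.toList.count ch) _ _ hcond]
  rw [repl_mapIdx]
  rw [show ((2*((M.toNat:Nat):Int)).toNat) = 2*M.toNat by omega]
  rw [concatB]
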